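-- pv_equiv track=rewrite | github.com/sburdges-eng/kelly-music-brain-clean | python/penta_core/ml/datasets/midi_generator.py | parse
-- ===== SOURCE A (Python) =====
-- from typing import Dict, List, Any, Optional, Tuple
--
-- NOTE_TO_MIDI = {
--     'C': 0, 'C#': 1, 'Db': 1, 'D': 2, 'D#': 3, 'Eb': 3,
--     'E': 4, 'F': 5, 'F#': 6, 'Gb': 6, 'G': 7, 'G#': 8,
--     'Ab': 8, 'A': 9, 'A#': 10, 'Bb': 10, 'B': 11
-- }
--
-- CHORD_INTERVALS = {
--     '': [0, 4, 7],           # Major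
--     'm': [0, 3, 7],          # Minor
--     'dim': [0, 3, 6],        # Diminished
--     'aug': [0, 4, 8],        # Augmented
--     '7': [0, 4, 7, 10],      # Dominant 7
--     'maj7': [0, 4, 7, 11],   # Major 7
--     'm7': [0, 3, 7, 10],     # Minor 7
--     'dim7': [0, 3, 6, 9],    # Diminished 7
--     'sus2': [0, 2, 7],       # Suspended 2
--     'sus4': [0, 5, 7],       # Suspended 4
--     'add9': [0, 4, 7, 14],   # Add 9
-- }
--
-- def parse(chord_symbol: str, octave: int = 4) -> List[int]:
--     """Parse chord symbol to MIDI note numbers."""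
--     if not chord_symbol or chord_symbol in ['N', 'NC', 'N.C.']:
--         return []
--
--     # Handle slash chords (C/G -> use C chord)
--     if '/' in chord_symbol:
--         chord_symbol = chord_symbol.split('/')[0]
--
--     # Extract root and quality
--     root = chord_symbol[0].upper()
--     rest = chord_symbol[1:]
--
--     # Check for accidental
--     if rest and rest[0] in '#b':
--         root += rest[0]
--         rest = rest[1:]
--
--     # Get root MIDI note
--     if root not in NOTE_TO_MIDI:
--         return []
--
--     root_midi = NOTE_TO_MIDI[root] + (octave * 12)
--
--     # Find matching quality
--     quality = ''
--     for q in sorted(CHORD_INTERVALS.keys(), key=len, reverse=True):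
--         if rest.startswith(q):
--             quality = q
--             break
--
--     # Get intervals
--     intervals = CHORD_INTERVALS.get(quality, CHORD_INTERVALS[''])
--
--     # Build chord notes
--     return [root_midi + i for i in intervals]
-- ===== SOURCE B (Python) =====
-- from typing import Dict, List, Any, Optional, Tuple
--
-- NOTE_TO_MIDI = {
--     'C': 0, 'C#': 1, 'Db': 1, 'D': 2, 'D#': 3, 'Eb': 3,
--     'E': 4, 'F': 5, 'F#': 6, 'Gb': 6, 'G': 7, 'G#': 8,
--     'Ab': 8, 'A': 9, 'A#': 10, 'Bb': 10, 'B': 11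
-- }
--
-- CHORD_INTERVALS = {
--     '': [0, 4, 7],
--     'm': [0, 3, 7],
--     'dim': [0, 3, 6],
--     'aug': [0, 4, 8],
--     '7': [0, 4, 7, 10],
--     'maj7': [0, 4, 7, 11],
--     'm7': [0, 3, 7, 10],
--     'dim7': [0, 3, 6, 9],
--     'sus2': [0, 2, 7],
--     'sus4': [0, 5, 7],
--     'add9': [0, 4, 7, 14],
-- }
--
-- def parse(chord_symbol: str, octave: int = 4) -> List[int]:
--     """Parse chord symbol to MIDI note numbers (longest-prefix quality search)."""
--     if not chord_symbol or chord_symbol in ('N', 'NC', 'N.C.'):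
--         return []
--     head = chord_symbol.split('/')[0] if '/' in chord_symbol else chord_symbol
--     root, rest = head[0].upper(), head[1:]
--     if rest[:1] in ('#', 'b'):
--         root, rest = root + rest[0], rest[1:]
--     if root not in NOTE_TO_MIDI:
--         return []
--     base = NOTE_TO_MIDI[root] + octave * 12
--     L = min(len(rest), 4)
--     while L > 0 and rest[:L] not in CHORD_INTERVALS:
--         L -= 1
--     return [base + i for i in CHORD_INTERVALS[rest[:L]]]
-- ===== Notes on version B (the rewrite author's own statement) =====
-- stated objective: alternative
-- what changed: B replaces A's scan over the length-sorted CHORD_INTERVALS key list with startswith tests by an input-driven longest-prefix search: a countdown over prefix lengths of the quality suffix using dict membership on rest[:L], so the sorted() call and the key-set scan disappear.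
-- outside the precondition, e.g. on parse('/', 4): A raises IndexError, B raises IndexError
import Mathlib
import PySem

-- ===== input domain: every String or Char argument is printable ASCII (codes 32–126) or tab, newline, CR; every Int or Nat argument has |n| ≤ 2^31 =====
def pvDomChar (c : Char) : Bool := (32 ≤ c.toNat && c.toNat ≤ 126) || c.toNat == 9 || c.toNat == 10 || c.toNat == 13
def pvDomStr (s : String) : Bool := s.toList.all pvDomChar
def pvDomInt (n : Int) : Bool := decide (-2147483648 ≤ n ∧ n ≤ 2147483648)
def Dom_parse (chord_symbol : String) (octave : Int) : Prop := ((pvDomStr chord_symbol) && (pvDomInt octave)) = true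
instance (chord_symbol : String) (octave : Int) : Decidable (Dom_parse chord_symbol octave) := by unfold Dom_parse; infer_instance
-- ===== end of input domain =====

-- B replaces A's scan of the length-sorted CHORD_INTERVALS key list by an input-driven
-- longest-prefix countdown with dict membership (objective: alternative, same cost).
-- Pre_parse excludes exactly the inputs on which A raises IndexError (strings starting with '/').

-- module constants, shared by both Pythons
def NOTE_TO_MIDI : PySem.Dict (List Char) Int :=
  PySem.Dict.ofList [(['C'],0), (['C','#'],1), (['D','b'],1), (['D'],2), (['D','#'],3), (['E','b'],3),
    (['E'],4), (['F'],5), (['F','#'],6), (['G','b'],6), (['G'],7), (['G','#'],8),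
    (['A','b'],8), (['A'],9), (['A','#'],10), (['B','b'],10), (['B'],11)]

def CHORD_INTERVALS : PySem.Dict (List Char) (List Int) :=
  PySem.Dict.ofList [([], [0,4,7]), (['m'],[0,3,7]), (['d','i','m'],[0,3,6]), (['a','u','g'],[0,4,8]),
    (['7'],[0,4,7,10]), (['m','a','j','7'],[0,4,7,11]), (['m','7'],[0,3,7,10]), (['d','i','m','7'],[0,3,6,9]),
    (['s','u','s','2'],[0,2,7]), (['s','u','s','4'],[0,5,7]), (['a','d','d','9'],[0,4,7,14])]

-- ===== PORT A =====

-- A's 'for q in sorted(...): if rest.startswith(q): quality = q; break' (quality initialised '')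
def parseAFind : List (List Char) → List Char → List Char
  | [], _ => []
  | q :: qs, rest => if PySem.Chars.startswith rest q then q else parseAFind qs rest

def parse (chord_symbol : String) (octave : Int) : List Int :=
  let cs := chord_symbol.toList
  if cs = [] ∨ cs = ['N'] ∨ cs = ['N','C'] ∨ cs = ['N','.','C','.'] then []
  else
    let cs₁ := if PySem.Chars.isIn ['/'] cs then ((PySem.Chars.split? cs ['/']).getD []).headD [] else cs
    match cs₁ with
    | [] => []   -- chord_symbol[0] raises IndexError here in Python; excluded by Pre_parse
    | c :: rest₀ =>
      let root₀ := [PySem.Chars.upperChar c]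
      let pr :=
        match rest₀ with
        | [] => (root₀, rest₀)
        | a :: t => if PySem.Chars.isIn [a] ['#','b'] then (root₀ ++ [a], t) else (root₀, rest₀)
      if ¬ (NOTE_TO_MIDI.contains pr.1) then []
      else
        let root_midi := (NOTE_TO_MIDI.get? pr.1).getD 0 + octave * 12
        let quality := parseAFind (PySem.List.sorted CHORD_INTERVALS.keys (fun k => k.length) true) pr.2
        let intervals := (CHORD_INTERVALS.get? quality).getD ((CHORD_INTERVALS.get? []).getD [])
        intervals.map (fun i => root_midi + i)

-- ===== PORT B =====

-- B's 'L = min(len(rest), 4); while L > 0 and rest[:L] not in CHORD_INTERVALS: L -= 1'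
def parseBFind (rest : List Char) : Nat → Nat
  | 0 => 0
  | (L+1) => if CHORD_INTERVALS.contains (List.take (L+1) rest) then L+1 else parseBFind rest L

def parse_alt (chord_symbol : String) (octave : Int) : List Int :=
  let cs := chord_symbol.toList
  if cs = [] ∨ cs = ['N'] ∨ cs = ['N','C'] ∨ cs = ['N','.','C','.'] then []
  else
    let hd := if PySem.Chars.isIn ['/'] cs then ((PySem.Chars.split? cs ['/']).getD []).headD [] else cs
    match hd with
    | [] => []   -- head[0] raises IndexError here in Python B too; excluded by Pre_parse
    | c :: r =>
      let rr := if List.take 1 r = ['#'] ∨ List.take 1 r = ['b']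
                then ([PySem.Chars.upperChar c] ++ List.take 1 r, List.drop 1 r)
                else ([PySem.Chars.upperChar c], r)
      if NOTE_TO_MIDI.contains rr.1 then
        let base := (NOTE_TO_MIDI.get? rr.1).getD 0 + octave * 12
        let L := parseBFind rr.2 (min rr.2.length 4)
        ((CHORD_INTERVALS.get? (List.take L rr.2)).getD []).map (fun i => base + i)
      else []

-- ===== PRECONDITION & SPEC =====
-- Pre_parse excludes exactly the inputs on which Python A raises IndexError: chord_symbol
-- starting with '/', where the part before the first '/' is empty and its [0] is taken.
def Pre_parse (chord_symbol : String) (octave : Int) : Prop := chord_symbol.toList.head? ≠ some '/'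
instance (chord_symbol : String) (octave : Int) : Decidable (Pre_parse chord_symbol octave) := by unfold Pre_parse; infer_instance
def pvWitness_parse : String × Int := ("Cmaj7", 4)
def Spec_parse (chord_symbol : String) (octave : Int) (out : List Int) : Prop := out = parse_alt chord_symbol octave
instance (chord_symbol : String) (octave : Int) (out : List Int) : Decidable (Spec_parse chord_symbol octave out) := by unfold Spec_parse; infer_instance

-- ===== CLAIM (what is proved, stated in full; the proofs are below) =====
def Claim_equal_parse : Prop := ∀ (chord_symbol : String) (octave : Int), Dom_parse chord_symbol octave → Pre_parse chord_symbol octave → Spec_parse chord_symbol octave (parse chord_symbol octave)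

-- ===== LEMMAS AND PROOFS =====

-- the 11 quality keys in A's sorted order (length-descending, stable)
def SKlit : List (List Char) :=
  [['m','a','j','7'],['d','i','m','7'],['s','u','s','2'],['s','u','s','4'],['a','d','d','9'],
   ['d','i','m'],['a','u','g'],['m','7'],['m'],['7'],[]]

set_option maxHeartbeats 1000000 in
theorem sorted_keys_eq :
    PySem.List.sorted CHORD_INTERVALS.keys (fun k => k.length) true = SKlit := by decide

set_option maxHeartbeats 1000000 in
theorem chord_items :
    CHORD_INTERVALS.items =
    [([], [0,4,7]), (['m'],[0,3,7]), (['d','i','m'],[0,3,6]), (['a','u','g'],[0,4,8]),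
    (['7'],[0,4,7,10]), (['m','a','j','7'],[0,4,7,11]), (['m','7'],[0,3,7,10]), (['d','i','m','7'],[0,3,6,9]),
    (['s','u','s','2'],[0,2,7]), (['s','u','s','4'],[0,5,7]), (['a','d','d','9'],[0,4,7,14])] := by decide

set_option maxRecDepth 8192 in
set_option maxHeartbeats 1000000 in
theorem contains_iff (k : List Char) :
    CHORD_INTERVALS.contains k = true ↔ k ∈ SKlit := by
  simp only [PySem.Dict.contains, chord_items, List.any_cons, List.any_nil, Bool.or_eq_true,
    beq_iff_eq, SKlit, List.mem_cons, List.not_mem_nil, or_false]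
  tauto

theorem bfind_le (rest : List Char) (n : Nat) : parseBFind rest n ≤ n := by
  induction n with
  | zero => simp [parseBFind]
  | succ m ih =>
    rw [parseBFind]
    split
    · exact le_refl _
    · exact Nat.le_succ_of_le ih

theorem bfind_contains (rest : List Char) (n : Nat) :
    CHORD_INTERVALS.contains (List.take (parseBFind rest n) rest) = true := by
  induction n with
  | zero => simp [parseBFind]; decide
  | succ m ih =>
    rw [parseBFind]
    split
    · assumption
    · exact ih

theorem bfind_max (rest : List Char) (n L : Nat) (h1 : parseBFind rest n < L) (h2 : L ≤ n) :
    CHORD_INTERVALS.contains (List.take L rest) = false := by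
  induction n with
  | zero => omega
  | succ m ih =>
    rw [parseBFind] at h1
    by_cases hc : CHORD_INTERVALS.contains (List.take (m+1) rest) = true
    · rw [if_pos hc] at h1; omega
    · rw [if_neg hc] at h1
      rcases Nat.lt_or_ge L (m+1) with hL | hL
      · exact ih h1 (by omega)
      · have : L = m + 1 := by omega
        subst this
        exact Bool.eq_false_iff.mpr hc

-- first match in a length-descending list is the longest matching prefix
theorem afind_walk (qs : List (List Char)) (rest T : List Char)
    (hT : T <+: rest) (hTmem : T ∈ qs)
    (hmax : ∀ k ∈ qs, k <+: rest → k.length ≤ T.length)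
    (hsorted : qs.Pairwise (fun p q => q.length ≤ p.length)) :
    parseAFind qs rest = T := by
  induction qs with
  | nil => cases hTmem
  | cons q qs ih =>
    rw [parseAFind]
    by_cases hq : PySem.Chars.startswith rest q = true
    · rw [if_pos hq]
      have hqpre : q <+: rest := (PySem.Chars.startswith_iff rest q).mp hq
      have hqle : q.length ≤ T.length := hmax q (List.mem_cons_self) hqpre
      rcases List.mem_cons.mp hTmem with rfl | hTtail
      · rfl
      · have hTq : T.length ≤ q.length := (List.pairwise_cons.mp hsorted).1 T hTtail
        have hlen : q.length = T.length := le_antisymm hqle hTq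
        have e1 := List.prefix_iff_eq_take.mp hqpre
        have e2 := List.prefix_iff_eq_take.mp hT
        rw [e1, e2, hlen]
    · rw [if_neg hq]
      have hTne : T ≠ q := by
        rintro rfl
        exact hq ((PySem.Chars.startswith_iff rest T).mpr hT)
      have hTtail : T ∈ qs := by
        rcases List.mem_cons.mp hTmem with rfl | h
        · exact absurd rfl hTne
        · exact h
      exact ih hTtail (fun k hk => hmax k (List.mem_cons_of_mem _ hk)) (List.pairwise_cons.mp hsorted).2

theorem sk_len_le (k : List Char) (hk : k ∈ SKlit) : k.length ≤ 4 := by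
  fin_cases hk <;> decide

theorem sk_get_some (k : List Char) (hk : k ∈ SKlit) : (CHORD_INTERVALS.get? k).isSome := by
  fin_cases hk <;> decide

theorem quality_eq (rest : List Char) :
    (CHORD_INTERVALS.get? (parseAFind
        (PySem.List.sorted CHORD_INTERVALS.keys (fun k => k.length) true) rest)).getD
      ((CHORD_INTERVALS.get? []).getD [])
    = (CHORD_INTERVALS.get? (List.take (parseBFind rest (min rest.length 4)) rest)).getD [] := by
  rw [sorted_keys_eq]
  set m := min rest.length 4 with hm
  set LB := parseBFind rest m with hLB
  have hLBm : LB ≤ m := bfind_le rest m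
  have hT : List.take LB rest <+: rest := List.take_prefix _ _
  have hTmem : List.take LB rest ∈ SKlit := (contains_iff _).mp (bfind_contains rest m)
  have hTlen : (List.take LB rest).length = LB := by
    have : LB ≤ rest.length := le_trans hLBm (min_le_left _ _)
    simp [List.length_take]; omega
  have hmax : ∀ k ∈ SKlit, k <+: rest → k.length ≤ (List.take LB rest).length := by
    intro k hk hpre
    rw [hTlen]
    by_contra hcon
    rw [not_le] at hcon
    have hk4 : k.length ≤ 4 := sk_len_le k hk
    have hklen : k.length ≤ rest.length := hpre.length_le
    have hkm : k.length ≤ m := le_min hklen hk4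
    have hfalse : CHORD_INTERVALS.contains (List.take k.length rest) = false :=
      bfind_max rest m k.length hcon hkm
    have hke : k = List.take k.length rest := List.prefix_iff_eq_take.mp hpre
    rw [← hke] at hfalse
    rw [(contains_iff k).mpr hk] at hfalse
    cases hfalse
  have hsorted : SKlit.Pairwise (fun p q => q.length ≤ p.length) := by decide
  rw [afind_walk SKlit rest (List.take LB rest) hT hTmem hmax hsorted]
  obtain ⟨v, hv⟩ := Option.isSome_iff_exists.mp (sk_get_some _ hTmem)
  simp [hv]

-- the accidental test of the two ports agrees
theorem accidental_iff (a : Char) :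
    PySem.Chars.isIn [a] ['#','b'] = true ↔ (a = '#' ∨ a = 'b') := by
  rw [PySem.Chars.isIn_iff_infix]
  constructor
  · intro h
    have := h.mem (List.mem_singleton.mpr rfl)
    simpa using this
  · rintro (rfl | rfl)
    · exact ⟨[], ['b'], rfl⟩
    · exact ⟨['#'], [], rfl⟩

-- the part after root extraction: A's branch-and-scan equals B's branch-and-countdown
theorem tail_eq (root rest : List Char) (octave : Int) :
    (if ¬ (NOTE_TO_MIDI.contains root) then []
     else
       ((CHORD_INTERVALS.get?
           (parseAFind (PySem.List.sorted CHORD_INTERVALS.keys (fun k => k.length) true) rest)).getD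
         ((CHORD_INTERVALS.get? []).getD [])).map
         (fun i => (NOTE_TO_MIDI.get? root).getD 0 + octave * 12 + i))
    = (if NOTE_TO_MIDI.contains root then
        ((CHORD_INTERVALS.get?
            (List.take (parseBFind rest (min rest.length 4)) rest)).getD []).map
          (fun i => (NOTE_TO_MIDI.get? root).getD 0 + octave * 12 + i)
      else []) := by
  by_cases hc : NOTE_TO_MIDI.contains root = true
  · simp only [hc, not_true]
    rw [quality_eq rest]
    simp
  · simp [hc]

-- ===== VERDICT (by name: the statement is the Claim_ definition above) =====
theorem parse_spec : Claim_equal_parse := by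
  intro chord_symbol octave _hdom _hpre
  unfold Spec_parse parse parse_alt
  by_cases hguard : chord_symbol.toList = [] ∨ chord_symbol.toList = ['N'] ∨
      chord_symbol.toList = ['N','C'] ∨ chord_symbol.toList = ['N','.','C','.']
  · simp only [if_pos hguard]
  · simp only [if_neg hguard]
    generalize (if PySem.Chars.isIn ['/'] chord_symbol.toList
        then ((PySem.Chars.split? chord_symbol.toList ['/']).getD []).headD []
        else chord_symbol.toList) = hd
    match hd with
    | [] => rfl
    | c :: r =>
      rcases r with _ | ⟨a, t⟩
      · have h2 : ¬ (List.take 1 ([] : List Char) = ['#'] ∨ List.take 1 ([] : List Char) = ['b']) := by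
          simp
        simp only [if_neg h2]
        exact tail_eq [PySem.Chars.upperChar c] [] octave
      · by_cases ha : a = '#' ∨ a = 'b'
        · have h1 : PySem.Chars.isIn [a] ['#','b'] = true := (accidental_iff a).mpr ha
          have h2 : List.take 1 (a :: t) = ['#'] ∨ List.take 1 (a :: t) = ['b'] := by
            rcases ha with rfl | rfl <;> simp
          simp only [if_pos h1, if_pos h2, List.drop_succ_cons, List.drop_zero]
          exact tail_eq ([PySem.Chars.upperChar c] ++ [a]) t octave
        · have h1 : ¬ (PySem.Chars.isIn [a] ['#','b'] = true) := fun h => ha ((accidental_iff a).mp h)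
          have h2 : ¬ (List.take 1 (a :: t) = ['#'] ∨ List.take 1 (a :: t) = ['b']) := by
            rintro (h | h) <;> exact ha (by simp_all)
          simp only [if_neg h1, if_neg h2]
          exact tail_eq [PySem.Chars.upperChar c] (a :: t) octave
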